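-- pv_equiv track=rewrite | github.com/trhariharasudhan/GrandpaAssistant | backend/app/api/web_api.py | _looks_like_tool_command
-- ===== SOURCE A (Python) =====
-- def _compact_text(value):
--     return " ".join(str(value or "").split()).strip()
--
-- def _looks_like_tool_command(command):
--     cleaned = _compact_text(command)
--     lowered = cleaned.lower()
--     if not cleaned:
--         return False
--     if len(cleaned) > 120:
--         return False
--     if any(phrase in lowered for phrase in ["this ensures", "to the user", "confirmation of service", "please confirm before"]):
--         return False
--     action_roots = (
--         "add ", "create ", "open ", "close ", "start ", "stop ", "show ", "tell ",
--         "set ", "enable ", "disable ", "clear ", "delete ", "remove ", "plan ",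
--         "search ", "scan ", "detect ", "count ", "watch ", "use ", "save ",
--         "list ", "rename ", "export ", "summarize ", "read ", "what ", "is ",
--     )
--     return lowered.startswith(action_roots)
-- ===== SOURCE B (Python) =====
-- _ROOTS = {
--     "add", "create", "open", "close", "start", "stop", "show", "tell",
--     "set", "enable", "disable", "clear", "delete", "remove", "plan",
--     "search", "scan", "detect", "count", "watch", "use", "save",
--     "list", "rename", "export", "summarize", "read", "what", "is",
-- }
--
-- _BLOCK_PHRASES = ["this ensures", "to the user", "confirmation of service", "please confirm before"]
--
--
-- def _looks_like_tool_command(command):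
--     words = str(command or "").split()
--     if not words:
--         return False
--     text = " ".join(words)
--     if len(text) > 120:
--         return False
--     lowered = text.lower()
--     if any(phrase in lowered for phrase in _BLOCK_PHRASES):
--         return False
--     return len(words) > 1 and words[0].lower() in _ROOTS
-- ===== Notes on version B (the rewrite author's own statement) =====
-- stated objective: simpler
-- what changed: A rebuilds a compacted string and prefix-matches it against a tuple of 29 space-terminated action prefixes; B splits the input into words once and decides by first-word set membership plus a second-word existence check (the empty/length/phrase guards are kept).
import Mathlib
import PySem

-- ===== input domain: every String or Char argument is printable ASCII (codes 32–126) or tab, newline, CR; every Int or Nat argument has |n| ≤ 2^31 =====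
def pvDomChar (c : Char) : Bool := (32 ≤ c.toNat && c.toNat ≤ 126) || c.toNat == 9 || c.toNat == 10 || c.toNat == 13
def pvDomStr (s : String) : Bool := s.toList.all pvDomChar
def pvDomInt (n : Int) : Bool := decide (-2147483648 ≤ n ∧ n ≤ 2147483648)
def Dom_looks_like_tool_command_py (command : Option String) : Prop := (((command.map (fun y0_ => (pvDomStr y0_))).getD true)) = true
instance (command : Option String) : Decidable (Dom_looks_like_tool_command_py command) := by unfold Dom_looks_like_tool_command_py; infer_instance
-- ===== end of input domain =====

-- B replaces A's prefix test (startswith against 29 "root "-prefixes of the rebuilt compacted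
-- string) by splitting the input once and testing first-token set membership; objective: simpler.

-- ===== PORT A =====
def compact_text_py (value : Option String) : String :=
  PySem.Str.strip (PySem.Str.join " " (PySem.Str.split₀ (value.getD "")))

def pvActionRoots : List String :=
  ["add ", "create ", "open ", "close ", "start ", "stop ", "show ", "tell ",
   "set ", "enable ", "disable ", "clear ", "delete ", "remove ", "plan ",
   "search ", "scan ", "detect ", "count ", "watch ", "use ", "save ",
   "list ", "rename ", "export ", "summarize ", "read ", "what ", "is "]

def looks_like_tool_command_py (command : Option String) : Bool :=
  let cleaned := compact_text_py command
  let lowered := PySem.Str.lower cleaned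
  if cleaned = "" then false
  else if 120 < PySem.Str.len cleaned then false
  else if (["this ensures", "to the user", "confirmation of service", "please confirm before"]).any
            (fun phrase => PySem.Str.isIn phrase lowered) then false
  else pvActionRoots.any (fun p => PySem.Str.startswith lowered p)

-- ===== PORT B =====
-- Python set literal _ROOTS (its distinct elements, in order)
def pvRootWords : List String :=
  ["add", "create", "open", "close", "start", "stop", "show", "tell",
   "set", "enable", "disable", "clear", "delete", "remove", "plan",
   "search", "scan", "detect", "count", "watch", "use", "save",
   "list", "rename", "export", "summarize", "read", "what", "is"]

def pvBlockPhrases : List String :=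
  ["this ensures", "to the user", "confirmation of service", "please confirm before"]

def looks_like_tool_command_py_alt (command : Option String) : Bool :=
  let words := PySem.Str.split₀ (command.getD "")
  if words = [] then false
  else
    let text := PySem.Str.join " " words
    if 120 < PySem.Str.len text then false
    else
      let lowered := PySem.Str.lower text
      if pvBlockPhrases.any (fun phrase => PySem.Str.isIn phrase lowered) then false
      else decide (1 < words.length) && pvRootWords.contains (PySem.Str.lower (words.getD 0 ""))

-- ===== PRECONDITION & SPEC =====
def Spec_looks_like_tool_command_py (command : Option String) (out : Bool) : Prop := out = looks_like_tool_command_py_alt command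
instance (command : Option String) (out : Bool) : Decidable (Spec_looks_like_tool_command_py command out) := by unfold Spec_looks_like_tool_command_py; infer_instance

-- ===== CLAIM (what is proved, stated in full; the proofs are below) =====
def Claim_equal_looks_like_tool_command_py : Prop := ∀ (command : Option String), Dom_looks_like_tool_command_py command → Spec_looks_like_tool_command_py command (looks_like_tool_command_py command)

-- ===== LEMMAS AND PROOFS =====

-- a "good" word: nonempty and whitespace-free (what str.split() produces)
def pvGoodWord (w : List Char) : Prop := w ≠ [] ∧ ∀ c ∈ w, PySem.Chars.isspace c = false

theorem pv_go_sound (s cur : List Char) (acc : List (List Char))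
    (hacc : ∀ w ∈ acc, pvGoodWord w) (hcur : ∀ c ∈ cur, PySem.Chars.isspace c = false) :
    ∀ w ∈ PySem.Chars.split₀.go s cur acc, pvGoodWord w := by
  induction s generalizing cur acc with
  | nil =>
    simp only [PySem.Chars.split₀.go]
    split_ifs with h
    · simpa using hacc
    · intro w hw
      simp only [List.mem_reverse, List.mem_cons] at hw
      rcases hw with h1 | h2
      · subst h1
        refine ⟨by simpa [List.isEmpty_iff] using h, ?_⟩
        intro c hc; exact hcur c (List.mem_reverse.mp hc)
      · exact hacc _ h2
  | cons c rest ih =>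
    simp only [PySem.Chars.split₀.go]
    split_ifs with hsp hemp
    · exact ih [] acc hacc (by simp)
    · refine ih [] _ ?_ (by simp)
      intro w hw
      rcases List.mem_cons.mp hw with h1 | h2
      · subst h1
        refine ⟨by simpa [List.isEmpty_iff] using hemp, ?_⟩
        intro d hd; exact hcur d (List.mem_reverse.mp hd)
      · exact hacc _ h2
    · exact ih (c :: cur) acc hacc (by
        intro d hd
        rcases List.mem_cons.mp hd with h1 | h2
        · subst h1; exact Bool.eq_false_iff.mpr hsp
        · exact hcur d h2)

theorem pv_split0_sound (cs : List Char) : ∀ w ∈ PySem.Chars.split₀ cs, pvGoodWord w :=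
  pv_go_sound cs [] [] (by simp) (by simp)

theorem pv_join_cons_cons (w v : List Char) (u : List (List Char)) :
    PySem.Chars.join [' '] (w :: v :: u) = w ++ ' ' :: PySem.Chars.join [' '] (v :: u) := by
  simp [PySem.Chars.join, List.intercalate, List.intersperse]

theorem pv_join_singleton (w : List Char) : PySem.Chars.join [' '] [w] = w := by
  simp [PySem.Chars.join, List.intercalate]

theorem pv_join_eq_nil (ws : List (List Char)) (h : ∀ w ∈ ws, pvGoodWord w) :
    PySem.Chars.join [' '] ws = [] ↔ ws = [] := by
  cases ws with
  | nil => simp [PySem.Chars.join, List.intercalate]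
  | cons w t =>
    simp only [iff_false, reduceCtorEq]
    have hw := (h w (by simp)).1
    cases t with
    | nil => simp [hw]
    | cons v u => simp [pv_join_cons_cons, hw]

theorem pv_lower_join (ws : List (List Char)) :
    PySem.Chars.lower (PySem.Chars.join [' '] ws)
      = PySem.Chars.join [' '] (ws.map PySem.Chars.lower) := by
  induction ws with
  | nil => simp [PySem.Chars.join, List.intercalate, PySem.Chars.lower]
  | cons w t ih =>
    cases t with
    | nil => simp
    | cons v u =>
      rw [pv_join_cons_cons]
      rw [show (w :: v :: u).map PySem.Chars.lower
            = PySem.Chars.lower w :: PySem.Chars.lower v :: u.map PySem.Chars.lower by simp]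
      rw [pv_join_cons_cons]
      rw [show (PySem.Chars.lower v :: u.map PySem.Chars.lower) = (v :: u).map PySem.Chars.lower by simp]
      rw [← ih]
      have hsp : PySem.Chars.lowerChar ' ' = ' ' := by decide
      simp [PySem.Chars.lower, hsp]

theorem pv_lstrip_join (ws : List (List Char)) (h : ∀ w ∈ ws, pvGoodWord w) :
    PySem.Chars.lstrip (PySem.Chars.join [' '] ws) = PySem.Chars.join [' '] ws := by
  cases ws with
  | nil => simp [PySem.Chars.lstrip, PySem.Chars.join, List.intercalate]
  | cons w t =>
    obtain ⟨hne, hsp⟩ := h w (by simp)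
    obtain ⟨c, w', rfl⟩ : ∃ c w', w = c :: w' := by
      cases w with | nil => exact absurd rfl hne | cons c w' => exact ⟨c, w', rfl⟩
    have hc : PySem.Chars.isspace c = false := hsp c (by simp)
    cases t with
    | nil => simp [PySem.Chars.lstrip, hc]
    | cons v u => simp [pv_join_cons_cons, PySem.Chars.lstrip, hc]

theorem pv_join_getLast? (ws : List (List Char)) (h : ∀ w ∈ ws, pvGoodWord w)
    (c : Char) (hc : (PySem.Chars.join [' '] ws).getLast? = some c) :
    PySem.Chars.isspace c = false := by
  induction ws with
  | nil => simp [PySem.Chars.join, List.intercalate] at hc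
  | cons w t ih =>
    cases t with
    | nil =>
      rw [pv_join_singleton] at hc
      exact (h w (by simp)).2 c (List.mem_of_getLast? hc)
    | cons v u =>
      have hJ2 : PySem.Chars.join [' '] (v :: u) ≠ [] := by
        have := (h v (by simp)).1
        cases u with
        | nil => simpa [pv_join_singleton] using this
        | cons x y => simp [pv_join_cons_cons]
      rw [pv_join_cons_cons, show w ++ ' ' :: PySem.Chars.join [' '] (v :: u)
            = (w ++ [' ']) ++ PySem.Chars.join [' '] (v :: u) by simp,
          List.getLast?_append_of_ne_nil _ hJ2] at hc
      exact ih (fun x hx => h x (by simp [hx])) hc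

theorem pv_strip_join (ws : List (List Char)) (h : ∀ w ∈ ws, pvGoodWord w) :
    PySem.Chars.strip (PySem.Chars.join [' '] ws) = PySem.Chars.join [' '] ws := by
  unfold PySem.Chars.strip
  rw [pv_lstrip_join ws h]
  unfold PySem.Chars.rstrip
  rcases List.eq_nil_or_concat (PySem.Chars.join [' '] ws) with hnil | ⟨ys, y, hy⟩
  · simp [hnil]
  · have hc : PySem.Chars.isspace y = false := by
      refine pv_join_getLast? ws h y ?_
      rw [hy]; simp
    rw [hy]
    simp [hc]

theorem pv_lowerChar_ne_space (c : Char) (h : PySem.Chars.isspace c = false) :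
    PySem.Chars.lowerChar c ≠ ' ' := by
  unfold PySem.Chars.lowerChar
  split_ifs with hup
  · intro he
    have hle : 65 ≤ c.toNat := by
      have h1 : ('A' : Char) ≤ c := by
        simpa [PySem.Chars.isupper, Bool.and_eq_true, decide_eq_true_eq] using
          (by simpa [PySem.Chars.isupper] using hup : ('A' : Char) ≤ c ∧ c ≤ 'Z').1
      exact h1
    have : (Char.ofNat (c.toNat + 32)).toNat = 32 := by rw [he]; decide
    rw [Char.toNat_ofNat] at this
    split_ifs at this
    omega
  · intro he
    rw [he] at h
    exact absurd h (by decide)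

theorem pv_no_space_lower (w : List Char) (h : ∀ c ∈ w, PySem.Chars.isspace c = false) :
    ' ' ∉ PySem.Chars.lower w := by
  intro hm
  rw [PySem.Chars.lower, List.mem_map] at hm
  obtain ⟨c, hc, he⟩ := hm
  exact pv_lowerChar_ne_space c (h c hc) he

theorem pv_prefix_word (w v r : List Char) (hw : ' ' ∉ w) (hv : ' ' ∉ v) :
    (w ++ [' ']) <+: (v ++ ' ' :: r) ↔ w = v := by
  induction w generalizing v with
  | nil =>
    cases v with
    | nil => simp
    | cons b v' =>
      simp only [List.nil_append]
      have hb : b ≠ ' ' := fun h => hv (by simp [h])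
      simp [List.cons_prefix_cons, hb.symm]
  | cons a w' ih =>
    have ha : a ≠ ' ' := fun h => hw (by simp [h])
    cases v with
    | nil =>
      simp only [List.cons_append, List.nil_append, List.cons_prefix_cons]
      simp [ha]
    | cons b v' =>
      simp only [List.cons_append, List.cons_prefix_cons]
      rw [ih v' (by intro h; exact hw (by simp [h])) (by intro h; exact hv (by simp [h]))]
      constructor
      · rintro ⟨rfl, rfl⟩; rfl
      · rintro h; injection h with h1 h2; exact ⟨h1, h2⟩

theorem pv_startswith_join (vs : List (List Char)) (hvs : ∀ v ∈ vs, ' ' ∉ v)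
    (w : List Char) (hw : ' ' ∉ w) :
    PySem.Chars.startswith (PySem.Chars.join [' '] vs) (w ++ [' ']) = true
      ↔ (1 < vs.length ∧ vs.getD 0 [] = w) := by
  rw [PySem.Chars.startswith, List.isPrefixOf_iff_prefix]
  cases vs with
  | nil => simp [PySem.Chars.join, List.intercalate]
  | cons v t =>
    cases t with
    | nil =>
      rw [pv_join_singleton]
      simp only [List.length_cons, List.length_nil]
      constructor
      · intro hpre
        exact absurd (hpre.subset (by simp)) (hvs v (by simp))
      · rintro ⟨h, -⟩; exact absurd h (by omega)
    | cons v' u =>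
      rw [pv_join_cons_cons]
      rw [pv_prefix_word w v _ hw (hvs v (by simp))]
      simp only [List.getD_cons_zero, List.length_cons]
      constructor
      · rintro rfl; exact ⟨by omega, rfl⟩
      · rintro ⟨-, rfl⟩; rfl

theorem pv_any_startswith (roots : List (List Char)) (hr : ∀ r ∈ roots, ' ' ∉ r)
    (vs : List (List Char)) (hvs : ∀ v ∈ vs, ' ' ∉ v) :
    (roots.any (fun r => PySem.Chars.startswith (PySem.Chars.join [' '] vs) (r ++ [' '])))
      = (decide (1 < vs.length) && roots.any (fun r => vs.getD 0 [] == r)) := by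
  rw [Bool.eq_iff_iff]
  simp only [List.any_eq_true, Bool.and_eq_true, decide_eq_true_eq, beq_iff_eq]
  constructor
  · rintro ⟨r, hrm, hsw⟩
    have := (pv_startswith_join vs hvs r (hr r hrm)).mp hsw
    exact ⟨this.1, r, hrm, this.2⟩
  · rintro ⟨hlen, r, hrm, heq⟩
    exact ⟨r, hrm, (pv_startswith_join vs hvs r (hr r hrm)).mpr ⟨hlen, heq⟩⟩

theorem pv_final (ws : List (List Char)) (hws : ∀ w ∈ ws, pvGoodWord w) (hemp : ws ≠ []) :
    pvActionRoots.any (fun p =>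
        PySem.Str.startswith (PySem.Str.lower (String.ofList (PySem.Chars.join [' '] ws))) p)
      = (decide (1 < (ws.map String.ofList).length)
          && pvRootWords.contains (PySem.Str.lower ((ws.map String.ofList).getD 0 ""))) := by
  obtain ⟨w, t, rfl⟩ : ∃ w t, ws = w :: t := by
    cases ws with | nil => exact absurd rfl hemp | cons w t => exact ⟨_, _, rfl⟩
  have hlow : PySem.Str.lower (String.ofList (PySem.Chars.join [' '] (w :: t)))
      = String.ofList (PySem.Chars.join [' '] ((w :: t).map PySem.Chars.lower)) := by
    rw [PySem.Str.lower, String.toList_ofList, pv_lower_join]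
  rw [hlow]
  have hvs : ∀ v ∈ (w :: t).map PySem.Chars.lower, ' ' ∉ v := by
    intro v hv; rw [List.mem_map] at hv; obtain ⟨x, hx, rfl⟩ := hv
    exact pv_no_space_lower x ((hws x hx).2)
  have hroots : pvActionRoots = pvRootWords.map (· ++ " ") := by decide
  have hsep : (" " : String).toList = [' '] := by decide
  have hsw : ∀ r : String,
      PySem.Str.startswith (String.ofList (PySem.Chars.join [' '] ((w :: t).map PySem.Chars.lower))) (r ++ " ")
        = PySem.Chars.startswith (PySem.Chars.join [' '] ((w :: t).map PySem.Chars.lower)) (r.toList ++ [' ']) := by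
    intro r
    rw [PySem.Str.startswith, String.toList_ofList, String.toList_append, hsep]
  rw [hroots, List.any_map]
  rw [show ((fun p => PySem.Str.startswith
        (String.ofList (PySem.Chars.join [' '] ((w :: t).map PySem.Chars.lower))) p) ∘ (· ++ " "))
      = fun r : String => PySem.Chars.startswith
          (PySem.Chars.join [' '] ((w :: t).map PySem.Chars.lower)) (r.toList ++ [' ']) by
    funext r; exact hsw r]
  rw [show (pvRootWords.any fun r : String => PySem.Chars.startswith
        (PySem.Chars.join [' '] ((w :: t).map PySem.Chars.lower)) (r.toList ++ [' ']))
      = ((pvRootWords.map String.toList).any fun rl => PySem.Chars.startswith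
          (PySem.Chars.join [' '] ((w :: t).map PySem.Chars.lower)) (rl ++ [' '])) by
    rw [List.any_map]; rfl]
  rw [pv_any_startswith (pvRootWords.map String.toList) (by decide) _ hvs]
  congr 1
  · simp
  · rw [Bool.eq_iff_iff]
    simp only [List.any_eq_true, List.mem_map, beq_iff_eq, List.contains_iff_mem]
    have hget : ((w :: t).map PySem.Chars.lower).getD 0 [] = PySem.Chars.lower w := by simp
    have hget2 : ((w :: t).map String.ofList).getD 0 "" = String.ofList w := by simp
    have hlow2 : PySem.Str.lower (String.ofList w) = String.ofList (PySem.Chars.lower w) := by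
      rw [PySem.Str.lower, String.toList_ofList]
    rw [hget, hget2, hlow2]
    constructor
    · rintro ⟨rl, ⟨r, hrm, rfl⟩, heq⟩
      rw [heq, String.ofList_toList]
      exact hrm
    · intro hm
      refine ⟨(String.ofList (PySem.Chars.lower w)).toList, ⟨_, hm, rfl⟩, ?_⟩
      simp

theorem pv_main (command : Option String) :
    looks_like_tool_command_py command = looks_like_tool_command_py_alt command := by
  unfold looks_like_tool_command_py looks_like_tool_command_py_alt compact_text_py
  dsimp only
  have hws := pv_split0_sound (command.getD "").toList
  have hsplit : PySem.Str.split₀ (command.getD "")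
      = (PySem.Chars.split₀ (command.getD "").toList).map String.ofList := rfl
  have hsep : (" " : String).toList = [' '] := by decide
  have hjoin : PySem.Str.join " " ((PySem.Chars.split₀ (command.getD "").toList).map String.ofList)
      = String.ofList (PySem.Chars.join [' '] (PySem.Chars.split₀ (command.getD "").toList)) := by
    simp [PySem.Str.join, hsep, List.map_map, Function.comp_def]
  have hstrip : PySem.Str.strip (String.ofList
        (PySem.Chars.join [' '] (PySem.Chars.split₀ (command.getD "").toList)))
      = String.ofList (PySem.Chars.join [' '] (PySem.Chars.split₀ (command.getD "").toList)) := by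
    rw [PySem.Str.strip, String.toList_ofList, pv_strip_join _ hws]
  rw [hsplit, hjoin, hstrip]
  set ws := PySem.Chars.split₀ (command.getD "").toList with hwsdef
  by_cases hemp : ws = []
  · rw [hemp]
    simp [PySem.Chars.join, List.intercalate, List.intersperse]
  · have hmapne : ws.map String.ofList ≠ [] := by simpa [List.map_eq_nil_iff] using hemp
    have hJne : String.ofList (PySem.Chars.join [' '] ws) ≠ "" := by
      intro hcontra
      rw [show ("" : String) = String.ofList [] from rfl] at hcontra
      exact hemp ((pv_join_eq_nil ws hws).mp (String.ofList_inj.mp hcontra))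
    rw [if_neg hJne, if_neg hmapne]
    by_cases h2 : (120 : Int) < PySem.Str.len (String.ofList (PySem.Chars.join [' '] ws))
    · rw [if_pos h2, if_pos h2]
    · rw [if_neg h2, if_neg h2]
      rw [show pvBlockPhrases
          = ["this ensures", "to the user", "confirmation of service", "please confirm before"] from rfl]
      by_cases h3 : (["this ensures", "to the user", "confirmation of service", "please confirm before"]).any
          (fun phrase => PySem.Str.isIn phrase
            (PySem.Str.lower (String.ofList (PySem.Chars.join [' '] ws)))) = true
      · rw [if_pos h3, if_pos h3]
      · rw [if_neg h3, if_neg h3]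
        exact pv_final ws hws hemp

-- ===== VERDICT (by name: the statement is the Claim_ definition above) =====
theorem looks_like_tool_command_py_spec : Claim_equal_looks_like_tool_command_py :=
  fun command _ => pv_main command
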